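-- pv_equiv track=rewrite | github.com/Brodich/sportsmens-run-test-task | modificationvariable.py | set_result_time
-- ===== SOURCE A (Python) =====
-- def get_result_time(start_time: str, finish_time: str) -> str:
--     """
--     Вычисляем разницу во времени между стартом и финишем
--
--     Args:
--         start_time: Время старта
--         finish_time: Время финиша
--
--     Returns:
--         Результат в виде строки (MM:CC:мс)
--     """
--     sec_hours, sec_minuts, seconds, milisec = map(
--         int, start_time.replace(',', ':').split(':'))
--     sec_hours2, sec_minuts2, seconds2, milisec2 = map(
--         int, finish_time.replace(',', ':').split(':'))
--
--     total = (sec_hours * 3600 + sec_minuts * 60 + seconds) * 1000000 + milisec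
--     total2 = (sec_hours2 * 3600 + sec_minuts2 * 60 + seconds2) * 1000000 + milisec2
--     diff_time = total2 - total
--
--     seconds, milisec = divmod(diff_time, 1000000)
--     minuts, seconds = divmod(seconds, 60)
--     milisec = int(milisec / 10000)
--
--     result_time = str(minuts).zfill(2) + ":" + str(
--         seconds).zfill(2) + "," + str(milisec).zfill(2)
--     return result_time
--
-- def set_result_time(content: list) -> list:
--     """
--     Удаляются start, finish, строчки с одинаковым номером.
--     Заносится результат времени в список.
--
--     Args:
--         content: С номером, start/finish, временем.
--     Returns:
--         content: С номером и результатом времени.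
--     """
--     for index, element in enumerate(content):
--         content[index] = element.split()
--
--     for index in range(0, len(content) - 1, 2):
--         start_time = content[index][2]
--         finish_time = content[index + 1][2]
--         result_time = get_result_time(start_time, finish_time)
--         content[index].append(result_time)
--         content[index].pop(1)
--         content[index].pop(1)
--     del content[1::2]
--     return content
-- ===== SOURCE B (Python) =====
-- def _fields(t: str):
--     """The four int fields of 'H:M:S,us' (a comma counts as ':')."""
--     return [int(x) for x in t.replace(',', ':').split(':')]
--
--
-- def get_result_time(start_time: str, finish_time: str) -> str:
--     # Mixed-radix borrow subtraction field by field, instead of converting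
--     # both stamps to one microsecond scalar and dividing back down.
--     h1, m1, s1, u1 = _fields(start_time)
--     h2, m2, s2, u2 = _fields(finish_time)
--     carry, micros = divmod(u2 - u1, 1000000)
--     carry, seconds = divmod(s2 - s1 + carry, 60)
--     minutes = (h2 - h1) * 60 + (m2 - m1) + carry
--     return (str(minutes).zfill(2) + ":" + str(seconds).zfill(2) + ","
--             + str(micros // 10000).zfill(2))
--
--
-- def set_result_time(content: list) -> list:
--     # One pass with a cursor: split each pair lazily and emit its result row
--     # directly (no pre-splitting pass, no in-place row surgery, no slice-delete).
--     result = []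
--     i = 0
--     n = len(content)
--     while i + 1 < n:
--         start = content[i].split()
--         finish = content[i + 1].split()
--         result.append([start[0], *start[3:], get_result_time(start[2], finish[2])])
--         i += 2
--     if i < n:
--         result.append(content[i].split())
--     content[:] = result
--     return content
-- ===== Notes on version B (the rewrite author's own statement) =====
-- stated objective: alternative
-- what changed: B computes the time difference by mixed-radix borrow subtraction field by field (microseconds, then seconds, then minutes, carrying borrows) instead of A's conversion of both stamps to a single microsecond scalar followed by chained divmods, and replaces A's two staged passes (pre-split everything in place, then range-step-2 append/pop/pop row surgery plus del content[1::2]) by one cursor loop that splits each pair lazily and emits its result row directly.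
import Mathlib
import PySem

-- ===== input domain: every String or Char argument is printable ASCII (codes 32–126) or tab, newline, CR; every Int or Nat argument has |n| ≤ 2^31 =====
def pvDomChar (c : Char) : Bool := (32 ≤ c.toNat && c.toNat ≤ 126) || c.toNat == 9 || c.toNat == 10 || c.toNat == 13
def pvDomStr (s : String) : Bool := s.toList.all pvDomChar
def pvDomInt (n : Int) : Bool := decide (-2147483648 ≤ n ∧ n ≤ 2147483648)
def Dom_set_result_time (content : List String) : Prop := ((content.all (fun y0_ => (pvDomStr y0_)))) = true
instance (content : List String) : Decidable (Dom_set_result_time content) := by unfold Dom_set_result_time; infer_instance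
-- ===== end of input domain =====

-- B computes the pair's time difference by mixed-radix borrow subtraction field by field
-- instead of A's single-microsecond-scalar conversion, and replaces A's two staged passes
-- (pre-split in place, then range-step-2 append/pop/pop surgery + del content[1::2]) by one
-- cursor loop emitting result rows directly; both Pythons mutate the argument identically,
-- the equivalence proved here is about the return value.

-- ===== PORT A =====

-- map(int, t.replace(',', ':').split(':')) unpacked into exactly four ints (none = ValueError)
def pvParseA (t : String) : Option (Int × Int × Int × Int) :=
  match (PySem.Str.split? (PySem.Str.replace t "," ":") ":").getD [] with
  | [a, b, c, d] =>
    match PySem.Int.ofStr? a, PySem.Int.ofStr? b, PySem.Int.ofStr? c, PySem.Int.ofStr? d with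
    | some x, some y, some z, some w => some (x, y, z, w)
    | _, _, _, _ => none
  | _ => none

def get_result_time (start_time finish_time : String) : String :=
  match pvParseA start_time, pvParseA finish_time with
  | some (sec_hours, sec_minuts, seconds0, milisec0),
    some (sec_hours2, sec_minuts2, seconds2, milisec2) =>
    let total := (sec_hours * 3600 + sec_minuts * 60 + seconds0) * 1000000 + milisec0
    let total2 := (sec_hours2 * 3600 + sec_minuts2 * 60 + seconds2) * 1000000 + milisec2
    let diff_time := total2 - total
    let seconds := PySem.Int.floordiv diff_time 1000000
    let milisec := PySem.Int.mod diff_time 1000000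
    let minuts := PySem.Int.floordiv seconds 60
    let seconds := PySem.Int.mod seconds 60
    -- int(milisec / 10000): exact as floor division, since here 0 ≤ milisec < 10^6 and
    -- the float quotient milisec/10000 < 100 truncates to the same integer
    let milisec := PySem.Int.floordiv milisec 10000
    PySem.Str.zfill (PySem.Int.toStr minuts) 2 ++ ":" ++
      PySem.Str.zfill (PySem.Int.toStr seconds) 2 ++ "," ++
      PySem.Str.zfill (PySem.Int.toStr milisec) 2
  | _, _ => ""   -- unreachable under Pre_ (Python raises ValueError here)

-- one iteration of 'for index in range(0, len(content) - 1, 2)'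
def pvStepA (rs : List (List String)) (i : Int) : List (List String) :=
  let start_time := PySem.List.pyGetD (PySem.List.pyGetD rs i []) 2 ""
  let finish_time := PySem.List.pyGetD (PySem.List.pyGetD rs (i + 1) []) 2 ""
  let result_time := get_result_time start_time finish_time
  let row := PySem.List.pyGetD rs i [] ++ [result_time]           -- .append(result_time)
  let row := ((PySem.List.pop? row 1).map Prod.snd).getD row      -- .pop(1)
  let row := ((PySem.List.pop? row 1).map Prod.snd).getD row      -- .pop(1)
  PySem.List.pySetD rs i row

-- 'del content[1::2]': keep the elements at even indices
def pvDelOdd {α : Type} : List α → List α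
  | [] => []
  | [a] => [a]
  | a :: _ :: rest => a :: pvDelOdd rest

def set_result_time (content : List String) : List (List String) :=
  let rows := content.map PySem.Str.split₀
  let rows := (PySem.List.pyRange 0 ((rows.length : Int) - 1) 2).foldl pvStepA rows
  pvDelOdd rows

-- ===== PORT B =====

-- _fields: [int(x) for x in t.replace(',', ':').split(':')], unpacked into four ints
def pvFields (t : String) : Option (Int × Int × Int × Int) :=
  match (PySem.Str.split? (PySem.Str.replace t "," ":") ":").getD [] with
  | [a, b, c, d] =>
    match PySem.Int.ofStr? a, PySem.Int.ofStr? b, PySem.Int.ofStr? c, PySem.Int.ofStr? d with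
    | some h, some m, some s, some us => some (h, m, s, us)
    | _, _, _, _ => none
  | _ => none

-- mixed-radix borrow subtraction: microseconds, then seconds, then minutes
def get_result_time_alt (start_time finish_time : String) : String :=
  match pvFields start_time, pvFields finish_time with
  | some (h1, m1, s1, u1), some (h2, m2, s2, u2) =>
    let carry := PySem.Int.floordiv (u2 - u1) 1000000
    let micros := PySem.Int.mod (u2 - u1) 1000000
    let carry2 := PySem.Int.floordiv (s2 - s1 + carry) 60
    let seconds := PySem.Int.mod (s2 - s1 + carry) 60
    let minutes := (h2 - h1) * 60 + (m2 - m1) + carry2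
    PySem.Str.zfill (PySem.Int.toStr minutes) 2 ++ ":" ++
      PySem.Str.zfill (PySem.Int.toStr seconds) 2 ++ "," ++
      PySem.Str.zfill (PySem.Int.toStr (PySem.Int.floordiv micros 10000)) 2
  | _, _ => ""   -- unreachable under Pre_ (Python raises ValueError here)

-- 'while i + 1 < n: … i += 2' over the remaining suffix, appending to result
def pvWhileB (lines : List String) (result : List (List String)) : List (List String) :=
  match lines with
  | a :: b :: rest =>
    let start := PySem.Str.split₀ a
    let finish := PySem.Str.split₀ b
    pvWhileB rest (result ++
      [PySem.List.pyGetD start 0 "" ::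
        (PySem.List.slice start (some 3) none ++
          [get_result_time_alt (PySem.List.pyGetD start 2 "")
            (PySem.List.pyGetD finish 2 "")])])
  | [a] => result ++ [PySem.Str.split₀ a]    -- the trailing 'if i < n' append
  | [] => result

def set_result_time_alt (content : List String) : List (List String) :=
  pvWhileB content []

-- ===== PRECONDITION & SPEC =====

-- Pre_ excludes exactly the inputs on which A raises: within each completed start/finish pair
-- both whitespace-split rows must have at least 3 tokens (else IndexError) and each third token
-- must split (commas count as colons) into exactly four int()-parseable fields (else ValueError).
def pvRowOk (r : List String) : Bool :=
  3 ≤ r.length &&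
    (match (PySem.Str.split? (PySem.Str.replace (r.getD 2 "") "," ":") ":").getD [] with
     | [a, b, c, d] => (PySem.Int.ofStr? a).isSome && (PySem.Int.ofStr? b).isSome &&
                       (PySem.Int.ofStr? c).isSome && (PySem.Int.ofStr? d).isSome
     | _ => false)

def pvPairsOk : List (List String) → Bool
  | a :: b :: rest => pvRowOk a && pvRowOk b && pvPairsOk rest
  | _ => true

def Pre_set_result_time (content : List String) : Prop :=
  pvPairsOk (content.map PySem.Str.split₀) = true

instance (content : List String) : Decidable (Pre_set_result_time content) := by
  unfold Pre_set_result_time; infer_instance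

def pvWitness_set_result_time : List String := ["1 start 0:0:1,0", "1 finish 0:0:2,5", "late"]

def Spec_set_result_time (content : List String) (out : List (List String)) : Prop :=
  out = set_result_time_alt content

instance (content : List String) (out : List (List String)) :
    Decidable (Spec_set_result_time content out) := by unfold Spec_set_result_time; infer_instance

-- ===== CLAIM (what is proved, stated in full; the proofs are below) =====
def Claim_equal_set_result_time : Prop :=
  ∀ (content : List String), Dom_set_result_time content → Pre_set_result_time content →
    Spec_set_result_time content (set_result_time content)

-- ===== LEMMAS AND PROOFS =====

theorem pvFields_eq (t : String) : pvFields t = pvParseA t := by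
  unfold pvFields pvParseA; rfl

-- the two formatting pipelines agree: A's chained divmods on the microsecond scalar
-- produce exactly B's borrow-subtraction fields
theorem pvGrt_eq (st ft : String) : get_result_time st ft = get_result_time_alt st ft := by
  unfold get_result_time get_result_time_alt
  rw [pvFields_eq st, pvFields_eq ft]
  rcases pvParseA st with _ | ⟨h1, m1, s1, u1⟩
  · rcases pvParseA ft with _ | ⟨h2, m2, s2, u2⟩ <;> rfl
  rcases pvParseA ft with _ | ⟨h2, m2, s2, u2⟩
  · rfl
  simp only
  set d : Int := ((h2 * 3600 + m2 * 60 + s2) * 1000000 + u2) -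
    ((h1 * 3600 + m1 * 60 + s1) * 1000000 + u1) with hd
  have e1 : ∀ x : Int, PySem.Int.floordiv x 1000000 = x / 1000000 :=
    fun x => PySem.Int.floordiv_eq_ediv_of_pos (by norm_num)
  have e2 : ∀ x : Int, PySem.Int.floordiv x 60 = x / 60 :=
    fun x => PySem.Int.floordiv_eq_ediv_of_pos (by norm_num)
  have e4 : ∀ x : Int, PySem.Int.floordiv x 10000 = x / 10000 :=
    fun x => PySem.Int.floordiv_eq_ediv_of_pos (by norm_num)
  have e5 : ∀ x : Int, PySem.Int.mod x 1000000 = x % 1000000 :=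
    fun x => PySem.Int.mod_eq_emod_of_pos (by norm_num)
  have e6 : ∀ x : Int, PySem.Int.mod x 60 = x % 60 :=
    fun x => PySem.Int.mod_eq_emod_of_pos (by norm_num)
  simp only [e1, e2, e4, e5, e6]
  have hmin : d / 1000000 / 60 = (h2 - h1) * 60 + (m2 - m1) + (s2 - s1 + (u2 - u1) / 1000000) / 60 := by
    omega
  have hsec : d / 1000000 % 60 = (s2 - s1 + (u2 - u1) / 1000000) % 60 := by omega
  have hus : d % 1000000 = (u2 - u1) % 1000000 := by omega
  rw [hmin, hsec, hus]

theorem pvPyRange2_nil (a b : Int) (h : b ≤ a) : PySem.List.pyRange a b 2 = [] := by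
  rw [PySem.List.pyRange_of_pos _ _ (by norm_num : (0:Int) < 2)]
  rw [if_neg (by omega)]
  simp

theorem pvPyRange2_cons (a b : Int) (h : a < b) :
    PySem.List.pyRange a b 2 = a :: PySem.List.pyRange (a + 2) b 2 := by
  rw [PySem.List.pyRange_of_pos _ _ (by norm_num : (0:Int) < 2),
      PySem.List.pyRange_of_pos _ _ (by norm_num : (0:Int) < 2)]
  by_cases h2 : a + 2 < b
  · have hc : ((b - a + 2 - 1) / 2).toNat = ((b - (a + 2) + 2 - 1) / 2).toNat + 1 := by omega
    rw [if_pos h, if_pos h2, hc, List.range_succ_eq_map]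
    simp only [List.map_cons, List.map_map, Nat.cast_zero, mul_zero, add_zero, List.cons.injEq,
      true_and]
    apply List.map_congr_left
    intro k _
    simp [Function.comp, Nat.succ_eq_add_one]
    ring
  · have hc : ((b - a + 2 - 1) / 2).toNat = 1 := by omega
    rw [if_pos h, if_neg h2, hc]
    simp

-- append/pop(1)/pop(1), as one function
def pvPop1 {α : Type} (row : List α) : List α :=
  ((PySem.List.pop? row 1).map Prod.snd).getD row

-- the transform A applies to a completed (start, finish) pair of split rows
def pvTfRow (a b : List String) : List String :=
  pvPop1 (pvPop1 (a ++ [get_result_time (PySem.List.pyGetD a 2 "") (PySem.List.pyGetD b 2 "")]))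

-- the state of A's index loop, pair by pair (odd rows untouched until the final deletion)
def pvPairA : List (List String) → List (List String)
  | [] => []
  | [a] => [a]
  | a :: b :: rest => pvTfRow a b :: b :: pvPairA rest

theorem pvGetD_append_len {α : Type} (done : List α) (a : α) (t : List α) (dflt : α) :
    PySem.List.pyGetD (done ++ a :: t) (done.length : Int) dflt = a := by
  rw [PySem.List.pyGetD_natCast]
  simp [List.getD]

theorem pvGetD_append_len1 {α : Type} (done : List α) (a b : α) (t : List α) (dflt : α) :
    PySem.List.pyGetD (done ++ a :: b :: t) ((done.length : Int) + 1) dflt = b := by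
  have : ((done.length : Int) + 1) = ((done.length + 1 : Nat) : Int) := by push_cast; ring
  rw [this, PySem.List.pyGetD_natCast]
  have h : done.length ≤ done.length + 1 := by omega
  simp [List.getD]

theorem pvSetD_append_len {α : Type} (done : List α) (a : α) (t : List α) (v : α) :
    PySem.List.pySetD (done ++ a :: t) (done.length : Int) v = done ++ v :: t := by
  unfold PySem.List.pySetD PySem.List.pySet? PySem.List.pyIdx?
  rw [if_pos (by positivity), if_pos (by simp)]
  simp [List.set_append]

theorem pvLoopA (todo done : List (List String)) :
    (PySem.List.pyRange (done.length : Int) ((done.length : Int) + todo.length - 1) 2).foldl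
        pvStepA (done ++ todo) = done ++ pvPairA todo := by
  induction todo using pvPairA.induct generalizing done with
  | case1 =>
    rw [show ((done.length : Int) + ([] : List (List String)).length - 1) = (done.length : Int) - 1 by simp]
    rw [pvPyRange2_nil _ _ (by omega)]
    simp [pvPairA]
  | case2 a =>
    rw [show ((done.length : Int) + ([a] : List (List String)).length - 1) = (done.length : Int) by simp]
    rw [pvPyRange2_nil _ _ (by omega)]
    simp [pvPairA]
  | case3 a b rest ih =>
    have hlen : ((done.length : Int) + (a :: b :: rest).length - 1) =
        (done.length : Int) + rest.length + 1 := by simp; ring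
    rw [hlen, pvPyRange2_cons _ _ (by omega), List.foldl_cons]
    have hstep : pvStepA (done ++ a :: b :: rest) (done.length : Int) =
        (done ++ [pvTfRow a b, b]) ++ rest := by
      unfold pvStepA pvTfRow
      rw [pvGetD_append_len, pvGetD_append_len1, pvSetD_append_len]
      simp [pvPop1]
    rw [hstep]
    have harith : ((done.length : Int) + 2) = (((done ++ [pvTfRow a b, b]).length : Nat) : Int) := by
      simp
    have harith2 : ((done.length : Int) + (rest.length : Int) + 1) =
        (((done ++ [pvTfRow a b, b]).length : Nat) : Int) + (rest.length : Int) - 1 := by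
      simp
      ring
    rw [harith, harith2, ih]
    simp [pvPairA]

theorem pvPop1_cons {α : Type} (x y : α) (t : List α) :
    pvPop1 (x :: y :: t) = x :: t := by
  unfold pvPop1
  rw [show (1 : Int) = ((1 : Nat) : Int) by norm_num,
      PySem.List.pop?_natCast (x :: y :: t) 1 (by simp)]
  simp

theorem pvTfRow_eq (a b : List String) (h : 3 ≤ a.length) :
    pvTfRow a b = PySem.List.pyGetD a 0 "" ::
      (PySem.List.slice a (some 3) none ++
        [get_result_time_alt (PySem.List.pyGetD a 2 "") (PySem.List.pyGetD b 2 "")]) := by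
  rcases a with _ | ⟨a0, _ | ⟨a1, _ | ⟨a2, rest⟩⟩⟩ <;> simp at h
  unfold pvTfRow
  rw [pvGrt_eq]
  have hslice : PySem.List.slice (a0 :: a1 :: a2 :: rest) (some 3) none =
      (a0 :: a1 :: a2 :: rest).drop (3 : Int).toNat :=
    PySem.List.slice_from _ (by norm_num)
  have hrow : (a0 :: a1 :: a2 :: rest) ++
      [get_result_time_alt (PySem.List.pyGetD (a0 :: a1 :: a2 :: rest) 2 "")
        (PySem.List.pyGetD b 2 "")] =
      a0 :: a1 :: (a2 :: rest ++ [get_result_time_alt (PySem.List.pyGetD (a0 :: a1 :: a2 :: rest) 2 "")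
        (PySem.List.pyGetD b 2 "")]) := by simp
  rw [hrow, pvPop1_cons]
  have h2 : a0 :: (a2 :: rest ++ [get_result_time_alt (PySem.List.pyGetD (a0 :: a1 :: a2 :: rest) 2 "")
      (PySem.List.pyGetD b 2 "")]) =
      a0 :: a2 :: (rest ++ [get_result_time_alt (PySem.List.pyGetD (a0 :: a1 :: a2 :: rest) 2 "")
      (PySem.List.pyGetD b 2 "")]) := by simp
  rw [h2, pvPop1_cons, hslice]
  simp [PySem.List.pyGetD_zero_cons]

-- B's cursor loop computes, pair by pair, exactly what A's surgery-plus-delete leaves behind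
theorem pvFinal (l : List String) (acc : List (List String))
    (h : pvPairsOk (l.map PySem.Str.split₀) = true) :
    pvWhileB l acc = acc ++ pvDelOdd (pvPairA (l.map PySem.Str.split₀)) := by
  induction l using pvDelOdd.induct generalizing acc with
  | case3 a b rest ih =>
    simp only [List.map_cons, pvPairsOk, Bool.and_eq_true] at h
    obtain ⟨⟨hra, _⟩, hrest⟩ := h
    have h3 : 3 ≤ (PySem.Str.split₀ a).length := by
      unfold pvRowOk at hra
      simp only [Bool.and_eq_true, decide_eq_true_eq] at hra
      exact hra.1
    unfold pvWhileB
    rw [ih _ hrest]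
    simp only [List.map_cons, pvPairA, pvDelOdd]
    rw [pvTfRow_eq _ _ h3]
    simp
  | case1 =>
    simp [pvWhileB, pvPairA, pvDelOdd]
  | case2 a =>
    simp [pvWhileB, pvPairA, pvDelOdd]

-- ===== VERDICT (by name: the statement is the Claim_ definition above) =====
theorem set_result_time_spec : Claim_equal_set_result_time := by
  unfold Claim_equal_set_result_time
  intro content _hdom hpre
  unfold Spec_set_result_time set_result_time set_result_time_alt
  have h0 := pvLoopA (content.map PySem.Str.split₀) []
  simp only [List.length_nil, Nat.cast_zero, zero_add, List.nil_append] at h0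
  rw [pvFinal content [] hpre, List.nil_append]
  exact congrArg pvDelOdd h0
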